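-- pv_equiv track=rewrite | github.com/prakashtanaji/DSAndAlgo | dailycode/python/stringprobs.py | solveReduce
-- ===== SOURCE A (Python) =====
-- def chReplace(s, l, r):
--     return s[:l] + s[r:r+1] + s[l+1:]
--
-- def solveReduce(s, k) :
--     l = 0
--     r = 0
--     count = 0
--     while r < len(s):
--         if count ==0 or s[l-1] != s[r]:
--             s = chReplace(s, l, r) #s[l] = s[r]
--             count = 1
--             l+=1
--         else :
--             count += 1
--             if count <= k:
--                 s = chReplace(s, l, r)
--                 l+=1
--         r+=1
--     return s[:l]
-- ===== SOURCE B (Python) =====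
-- from itertools import groupby
--
--
-- def solveReduce(s, k):
--     m = max(k, 1)
--     return ''.join(ch * min(len(list(g)), m) for ch, g in groupby(s))
-- ===== Notes on version B (the rewrite author's own statement) =====
-- stated objective: faster
-- what changed: Replaces the two-pointer in-place overwrite loop (which rebuilds the whole string with slice concatenation on every kept character) by groupby run-grouping followed by emitting each run's character min(runlen, max(k,1)) times and joining once.
import Mathlib
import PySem

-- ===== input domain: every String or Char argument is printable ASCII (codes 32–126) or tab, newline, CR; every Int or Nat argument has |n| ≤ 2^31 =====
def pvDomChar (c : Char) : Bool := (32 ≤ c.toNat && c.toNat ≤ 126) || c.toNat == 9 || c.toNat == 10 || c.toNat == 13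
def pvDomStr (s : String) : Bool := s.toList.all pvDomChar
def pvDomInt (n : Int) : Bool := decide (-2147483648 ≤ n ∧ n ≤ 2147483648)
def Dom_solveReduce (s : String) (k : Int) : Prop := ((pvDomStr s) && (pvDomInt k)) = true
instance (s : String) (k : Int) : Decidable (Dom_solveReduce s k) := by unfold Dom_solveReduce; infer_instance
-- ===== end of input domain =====

-- B replaces A's two-pointer in-place overwrite (quadratic slice rebuilding) by run-grouping
-- (groupby) and emitting each run capped at max(k,1) characters; return values proved equal.

-- ===== PORT A =====
-- chReplace(s, l, r) = s[:l] + s[r:r+1] + s[l+1:]   (on the character list)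
def chReplaceL (s : List Char) (l r : Int) : List Char :=
  PySem.List.slice s none (some l) ++ PySem.List.slice s (some r) (some (r + 1)) ++
    PySem.List.slice s (some (l + 1)) none

-- the while loop of A; fuel is length+1, enough since r increases by 1 each pass
def loopA (k : Int) : Nat → List Char → Int → Int → Int → List Char
  | 0, s, l, _, _ => PySem.List.slice s none (some l)
  | fuel + 1, s, l, r, count =>
    if r < (s.length : Int) then
      if count = 0 ∨ PySem.List.pyGet? s (l - 1) ≠ PySem.List.pyGet? s r then
        loopA k fuel (chReplaceL s l r) (l + 1) (r + 1) 1
      else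
        if count + 1 ≤ k then
          loopA k fuel (chReplaceL s l r) (l + 1) (r + 1) (count + 1)
        else
          loopA k fuel s l (r + 1) (count + 1)
    else
      PySem.List.slice s none (some l)

def solveReduce (s : String) (k : Int) : String :=
  String.ofList (loopA k (s.toList.length + 1) s.toList 0 0 0)

-- ===== PORT B =====
-- itertools.groupby(s): the maximal runs of equal characters, as (char, run length)
def runsB : List Char → List (Char × Nat)
  | [] => []
  | c :: cs =>
    match runsB cs with
    | (d, n) :: rest => if c = d then (c, n + 1) :: rest else (c, 1) :: (d, n) :: rest
    | [] => [(c, 1)]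

def solveReduce_alt (s : String) (k : Int) : String :=
  String.ofList ((runsB s.toList).flatMap
    (fun p => List.replicate (min (p.2 : Int) (max k 1)).toNat p.1))

-- ===== PRECONDITION & SPEC =====
def Spec_solveReduce (s : String) (k : Int) (out : String) : Prop := out = solveReduce_alt s k
instance (s : String) (k : Int) (out : String) : Decidable (Spec_solveReduce s k out) := by unfold Spec_solveReduce; infer_instance

-- ===== CLAIM (what is proved, stated in full; the proofs are below) =====
def Claim_equal_solveReduce : Prop := ∀ (s : String) (k : Int), Dom_solveReduce s k → Spec_solveReduce s k (solveReduce s k)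

-- ===== LEMMAS AND PROOFS =====

def emitB (k : Int) (p : Char × Nat) : List Char :=
  List.replicate (min (p.2 : Int) (max k 1)).toNat p.1
def tailRun (k : Int) (prev : Char) (count : Int) : List Char → List Char
  | [] => []
  | c :: cs =>
    if c = prev then
      (if count + 1 ≤ k then [c] else []) ++ tailRun k prev (count + 1) cs
    else
      c :: tailRun k c 1 cs
def glue (k : Int) (prev : Char) (count : Int) : List (Char × Nat) → List Char
  | [] => []
  | (c, n) :: rest =>
    if c = prev then
      List.replicate (min (count + (n : Int)) (max k 1) - count).toNat c ++ rest.flatMap (emitB k)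
    else
      ((c, n) :: rest).flatMap (emitB k)

lemma rep_congr {a b : Int} (c : Char) (L : List Char) (h : a.toNat = b.toNat) :
    List.replicate a.toNat c ++ L = List.replicate b.toNat c ++ L := by rw [h]


lemma tailRun_eq_glue (k : Int) (cs : List Char) : ∀ (prev : Char) (count : Int),
    1 ≤ count → tailRun k prev count cs = glue k prev count (runsB cs) := by
  induction cs with
  | nil => intro prev count _; simp [tailRun, runsB, glue]
  | cons c cs ih =>
    intro prev count hc
    have hm : (1:Int) ≤ max k 1 := le_max_right _ _
    by_cases hcp : c = prev
    · subst hcp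
      rw [tailRun, if_pos rfl, ih c (count + 1) (by omega)]
      rcases h : runsB cs with _ | ⟨⟨d, n⟩, rest⟩
      · rw [show runsB (c :: cs) = [(c, 1)] from by simp [runsB, h]]
        simp only [glue, if_pos rfl, List.flatMap_nil, List.append_nil, Nat.cast_one]
        have h1 : (min (count + (1:Int)) (max k 1) - count).toNat
            = (if count + 1 ≤ k then 1 else 0) := by split_ifs with hk <;> omega
        rw [h1]
        split_ifs with hk <;> simp
      · by_cases hcd : c = d
        · subst hcd
          rw [show runsB (c :: cs) = (c, n + 1) :: rest from by simp [runsB, h]]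
          simp only [glue, if_pos rfl, Nat.cast_add, Nat.cast_one]
          by_cases hk : count + 1 ≤ k
          · rw [if_pos hk]
            have h1 : (min (count + ((n:Int) + 1)) (max k 1) - count).toNat
                = ((min (count + 1 + (n:Int)) (max k 1) - (count + 1)).toNat) + 1 := by omega
            rw [h1, List.replicate_succ]
            simp
          · rw [if_neg hk, List.nil_append]
            have h1 : (min (count + 1 + (n:Int)) (max k 1) - (count + 1)).toNat
                = (min (count + ((n:Int) + 1)) (max k 1) - count).toNat := by
              have : max k 1 ≤ count := by omega
              omega
            exact rep_congr c _ h1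
        · rw [show runsB (c :: cs) = (c, 1) :: (d, n) :: rest from by simp [runsB, h, hcd]]
          simp only [glue, if_pos rfl, if_neg hcd, Nat.cast_one]
          have h1 : (min (count + (1:Int)) (max k 1) - count).toNat
              = (if count + 1 ≤ k then 1 else 0) := by split_ifs with hk <;> omega
          have hdc : ¬ d = c := fun hh => hcd hh.symm
          rw [h1]
          split_ifs with hk <;> simp [glue, emitB, hdc]
    · rw [tailRun, if_neg hcp, ih c 1 le_rfl]
      rcases h : runsB cs with _ | ⟨⟨d, n⟩, rest⟩
      · rw [show runsB (c :: cs) = [(c, 1)] from by simp [runsB, h]]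
        simp only [glue, if_neg hcp, List.flatMap_cons, List.flatMap_nil, List.append_nil,
          emitB, Nat.cast_one]
        have h1 : (min ((1:Int)) (max k 1)).toNat = 1 := by omega
        simp [h1]
      · by_cases hcd : c = d
        · subst hcd
          rw [show runsB (c :: cs) = (c, n + 1) :: rest from by simp [runsB, h]]
          simp only [glue, if_neg hcp, if_pos rfl, List.flatMap_cons, emitB,
            Nat.cast_add, Nat.cast_one]
          have h1 : (min (((n:Int) + 1)) (max k 1)).toNat
              = ((min ((1:Int) + (n:Int)) (max k 1) - 1).toNat) + 1 := by omega
          rw [h1, List.replicate_succ]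
          simp
        · rw [show runsB (c :: cs) = (c, 1) :: (d, n) :: rest from by simp [runsB, h, hcd]]
          have hdc : ¬ d = c := fun hh => hcd hh.symm
          simp only [glue, if_neg hcp, if_neg hcd, List.flatMap_cons, emitB, Nat.cast_one]
          have h1 : (min ((1:Int)) (max k 1)).toNat = 1 := by omega
          simp [glue, h1, hdc]

lemma head_glue (k : Int) (c : Char) (cs : List Char) :
    (runsB (c :: cs)).flatMap (emitB k) = c :: glue k c 1 (runsB cs) := by
  have hm : (1:Int) ≤ max k 1 := le_max_right _ _
  rcases h : runsB cs with _ | ⟨⟨d, n⟩, rest⟩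
  · rw [show runsB (c :: cs) = [(c, 1)] from by simp [runsB, h]]
    have h1 : (min ((1:Int)) (max k 1)).toNat = 1 := by omega
    simp [glue, emitB, h1]
  · by_cases hcd : c = d
    · subst hcd
      rw [show runsB (c :: cs) = (c, n + 1) :: rest from by simp [runsB, h]]
      simp only [glue, if_pos rfl, List.flatMap_cons, emitB, Nat.cast_add, Nat.cast_one]
      have h1 : (min (((n:Int) + 1)) (max k 1)).toNat
          = ((min ((1:Int) + (n:Int)) (max k 1) - 1).toNat) + 1 := by omega
      rw [h1, List.replicate_succ]
      simp
    · rw [show runsB (c :: cs) = (c, 1) :: (d, n) :: rest from by simp [runsB, h, hcd]]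
      have hdc : ¬ d = c := fun hh => hcd hh.symm
      simp only [glue, if_neg hcd, List.flatMap_cons, emitB, Nat.cast_one]
      have h1 : (min ((1:Int)) (max k 1)).toNat = 1 := by omega
      simp [glue, h1, hdc]


lemma chReplaceL_eq (out junk rest' : List Char) (prev c : Char) :
    chReplaceL (out ++ [prev] ++ junk ++ (c :: rest'))
        ((out.length : Int) + 1) ((out.length : Int) + 1 + junk.length)
      = (out ++ [prev]) ++ [c] ++ ((junk ++ [c]).tail ++ rest') := by
  rw [chReplaceL, PySem.List.slice_to _ (by omega), PySem.List.slice_toNat _ (by omega) (by omega),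
    PySem.List.slice_from _ (by omega)]
  have e1 : ((out.length : Int) + 1).toNat = (out ++ [prev]).length := by simp <;> omega
  have e2 : ((out.length : Int) + 1 + (junk.length : Int)).toNat
      = (out ++ [prev] ++ junk).length := by simp <;> omega
  have e3 : ((out.length : Int) + 1 + (junk.length : Int) + 1).toNat
      = (out ++ [prev] ++ junk).length + 1 := by simp <;> omega
  have e4 : ((out.length : Int) + 1 + 1).toNat = (out ++ [prev]).length + 1 := by simp <;> omega
  rw [e1, e2, e3, e4]
  have hA : (out ++ [prev] ++ junk ++ (c :: rest')).take (out ++ [prev]).length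
      = out ++ [prev] := by
    rw [show out ++ [prev] ++ junk ++ (c :: rest') = (out ++ [prev]) ++ (junk ++ c :: rest') by simp]
    exact List.take_left
  have hB : (out ++ [prev] ++ junk ++ (c :: rest')).drop (out ++ [prev] ++ junk).length
      = c :: rest' := by
    rw [show out ++ [prev] ++ junk ++ (c :: rest') = (out ++ [prev] ++ junk) ++ (c :: rest') by simp]
    exact List.drop_left
  have hC : (out ++ [prev] ++ junk ++ (c :: rest')).drop ((out ++ [prev]).length + 1)
      = (junk ++ [c]).tail ++ rest' := by
    rw [show out ++ [prev] ++ junk ++ (c :: rest') = (out ++ [prev]) ++ (junk ++ c :: rest') by simp]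
    rw [show (out ++ [prev]).length + 1 = (out ++ [prev]).length + 1 from rfl]
    rw [List.drop_length_add_append]
    cases junk <;> simp
  rw [hA, hB, hC]
  rw [show (out ++ [prev] ++ junk).length + 1 - (out ++ [prev] ++ junk).length = 1 by omega]
  simp

lemma loopA_invariant (k : Int) (rest : List Char) :
    ∀ (junk out : List Char) (prev : Char) (count : Int), 1 ≤ count →
    loopA k (rest.length + 1) (out ++ [prev] ++ junk ++ rest)
        ((out.length : Int) + 1) ((out.length : Int) + 1 + junk.length) count
      = out ++ [prev] ++ tailRun k prev count rest := by
  induction rest with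
  | nil =>
    intro junk out prev count _
    rw [loopA]
    have hlen : ((out ++ [prev] ++ junk ++ ([] : List Char)).length : Int)
        = (out.length : Int) + 1 + junk.length := by simp <;> omega
    rw [if_neg (by omega)]
    rw [PySem.List.slice_to _ (by omega)]
    rw [show ((out.length : Int) + 1).toNat = (out ++ [prev]).length from by simp <;> omega]
    rw [show out ++ [prev] ++ junk ++ ([] : List Char) = (out ++ [prev]) ++ junk from by simp]
    rw [List.take_left]
    simp [tailRun]
  | cons c rest ih =>
    intro junk out prev count hc
    have hm : ((out ++ [prev] ++ junk ++ (c :: rest)).length : Int)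
        = (out.length : Int) + 1 + junk.length + 1 + rest.length := by simp <;> omega
    rw [show (c :: rest).length + 1 = rest.length + 1 + 1 from by simp]
    rw [loopA, if_pos (by omega)]
    have hgl : PySem.List.pyGet? (out ++ [prev] ++ junk ++ (c :: rest))
        ((out.length : Int) + 1 - 1) = some prev := by
      rw [show (out.length : Int) + 1 - 1 = (out.length : Int) by ring]
      rw [show out ++ [prev] ++ junk ++ (c :: rest) = out ++ prev :: (junk ++ c :: rest) from by simp]
      exact PySem.List.pyGet?_append_length _ _ _
    have hgr : PySem.List.pyGet? (out ++ [prev] ++ junk ++ (c :: rest))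
        ((out.length : Int) + 1 + junk.length) = some c := by
      rw [show out ++ [prev] ++ junk ++ (c :: rest) = (out ++ [prev] ++ junk) ++ c :: rest from by simp]
      rw [show (out.length : Int) + 1 + (junk.length : Int)
          = ((out ++ [prev] ++ junk).length : Int) from by simp <;> omega]
      exact PySem.List.pyGet?_append_length _ _ _
    by_cases hcp : c = prev
    · subst hcp
      rw [if_neg (by rw [hgl, hgr]; push_neg; exact ⟨by omega, rfl⟩)]
      by_cases hk : count + 1 ≤ k
      · rw [if_pos hk, chReplaceL_eq]
        rw [show (out.length : Int) + 1 + 1 = ((out ++ [c]).length : Int) + 1 from by simp <;> omega]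
        rw [show (out.length : Int) + 1 + (junk.length : Int) + 1
            = ((out ++ [c]).length : Int) + 1 + ((junk ++ [c]).tail.length : Int) from by
          simp <;> omega]
        rw [show (out ++ [c]) ++ [c] ++ ((junk ++ [c]).tail ++ rest)
            = (out ++ [c]) ++ [c] ++ (junk ++ [c]).tail ++ rest from by simp]
        rw [ih ((junk ++ [c]).tail) (out ++ [c]) c (count + 1) (by omega)]
        rw [tailRun, if_pos rfl, if_pos hk]
        simp
      · rw [if_neg hk]
        rw [show out ++ [c] ++ junk ++ (c :: rest) = out ++ [c] ++ (junk ++ [c]) ++ rest from by simp]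
        rw [show (out.length : Int) + 1 + (junk.length : Int) + 1
            = (out.length : Int) + 1 + (((junk ++ [c]).length : Nat) : Int) from by simp <;> omega]
        rw [ih (junk ++ [c]) out c (count + 1) (by omega)]
        rw [tailRun, if_pos rfl, if_neg hk]
        simp
    · rw [if_pos (Or.inr (by rw [hgl, hgr]; simp [Ne.symm hcp]))]
      rw [chReplaceL_eq]
      rw [show (out.length : Int) + 1 + 1 = ((out ++ [prev]).length : Int) + 1 from by simp <;> omega]
      rw [show (out.length : Int) + 1 + (junk.length : Int) + 1
          = ((out ++ [prev]).length : Int) + 1 + ((junk ++ [c]).tail.length : Int) from by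
        simp <;> omega]
      rw [show (out ++ [prev]) ++ [c] ++ ((junk ++ [c]).tail ++ rest)
          = (out ++ [prev]) ++ [c] ++ (junk ++ [c]).tail ++ rest from by simp]
      rw [ih ((junk ++ [c]).tail) (out ++ [prev]) c 1 le_rfl]
      rw [tailRun, if_neg hcp]
      simp

-- ===== VERDICT (by name: the statement is the Claim_ definition above) =====
theorem solveReduce_spec : Claim_equal_solveReduce := by
  intro s k _
  unfold Spec_solveReduce solveReduce solveReduce_alt
  congr 1
  rw [show (fun p : Char × Nat => List.replicate (min ((p.2 : Int)) (max k 1)).toNat p.1)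
      = emitB k from rfl]
  rcases h : s.toList with _ | ⟨c, cs⟩
  · simp [loopA, runsB, PySem.List.slice]
  · rw [show (c :: cs).length + 1 = (cs.length + 1) + 1 from by simp]
    rw [loopA, if_pos (by simp)]
    rw [if_pos (Or.inl rfl)]
    have hch : chReplaceL (c :: cs) 0 (0 : Int) = c :: cs := by
      rw [chReplaceL, PySem.List.slice_to _ (by omega),
        PySem.List.slice_toNat _ (by omega) (by omega), PySem.List.slice_from _ (by omega)]
      simp
    rw [hch]
    have H := loopA_invariant k cs [] [] c 1 le_rfl
    norm_num at H
    rw [show (0 : Int) + 1 = 1 from by ring]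
    rw [H, tailRun_eq_glue k cs c 1 le_rfl, ← head_glue]
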